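-- pv_equiv track=rewrite | github.com/johnanleitner1-Coder/lastminutedeals-api | tools/fetch_rezdy_slots.py | _primary_option_label
-- ===== SOURCE A (Python) =====
-- def _primary_option_label(session: dict) -> str:
--     """Pick the primary price option label (Adult > Standard > General > first)."""
--     options = session.get("priceOptions") or []
--     preferred = ["adult", "adults", "standard", "general", "person", "1 person"]
--     for pref in preferred:
--         for opt in options:
--             label = (opt.get("label") or "").lower()
--             if pref in label:
--                 return opt.get("label", "Adult")
--     if options:
--         return options[0].get("label", "Adult")
--     return "Adult"
-- ===== SOURCE B (Python) =====
-- def _primary_option_label(session: dict) -> str: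
--     """Pick the primary price option label (Adult > Standard > General > first)."""
--     options = session.get("priceOptions") or []
--     preferred = ["adult", "adults", "standard", "general", "person", "1 person"]
--
--     def rank(opt):
--         label = (opt.get("label") or "").lower()
--         for i, p in enumerate(preferred):
--             if p in label:
--                 return i
--         return len(preferred)
--
--     best = None
--     best_rank = len(preferred) + 1
--     for opt in options:
--         r = rank(opt)
--         if r < best_rank:
--             best, best_rank = opt, r
--     return best.get("label", "Adult") if best is not None else "Adult"
-- ===== Notes on version B (the rewrite author's own statement) =====
-- stated objective: alternative
-- what changed: Replaced the preference-outer/option-inner nested scans (up to 6 passes over options) by a single option-outer pass that scores each option with the index of its first matching preference and keeps a stable running argmin.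
import Mathlib
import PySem

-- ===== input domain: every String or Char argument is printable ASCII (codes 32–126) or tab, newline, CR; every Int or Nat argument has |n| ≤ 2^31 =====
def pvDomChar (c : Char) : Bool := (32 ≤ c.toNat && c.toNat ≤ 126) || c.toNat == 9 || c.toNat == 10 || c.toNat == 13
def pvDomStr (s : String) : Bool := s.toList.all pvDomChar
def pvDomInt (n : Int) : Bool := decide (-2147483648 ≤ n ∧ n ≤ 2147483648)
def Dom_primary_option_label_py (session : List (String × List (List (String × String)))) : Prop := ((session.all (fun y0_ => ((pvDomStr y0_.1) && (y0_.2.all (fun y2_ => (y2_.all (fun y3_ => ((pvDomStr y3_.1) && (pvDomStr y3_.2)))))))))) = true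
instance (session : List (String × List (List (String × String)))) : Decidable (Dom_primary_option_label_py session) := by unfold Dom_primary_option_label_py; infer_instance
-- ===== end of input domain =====

-- B replaces A's preference-outer nested scans by one option-outer scoring pass with a stable running argmin (alternative decomposition, same cost class).

-- shared label plumbing (identical in both Pythons)
-- dict.get on an association list: first match
def pvGet? (d : List (String × String)) (k : String) : Option String :=
  (d.find? (fun kv => kv.1 == k)).map (fun kv => kv.2)

-- (opt.get("label") or "").lower()   ('x or ""' coincides with getD "" since the only falsy string is "")
def pvLabelLC (opt : List (String × String)) : String :=
  PySem.Str.lower ((pvGet? opt "label").getD "")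

-- opt.get("label", "Adult")
def pvLabelD (opt : List (String × String)) : String :=
  (pvGet? opt "label").getD "Adult"

def pvPreferred : List String := ["adult", "adults", "standard", "general", "person", "1 person"]

-- session.get("priceOptions") or []   ('or []' coincides with getD [] since the only falsy list is [])
def pvOptions (session : List (String × List (List (String × String)))) : List (List (String × String)) :=
  (((session.find? (fun kv => kv.1 == "priceOptions")).map (fun kv => kv.2))).getD []

-- ===== PORT A =====
-- outer loop over preferences; the inner 'for opt in options: … return' is the first-match scan find?
def pvLoopA (prefs : List String) (options : List (List (String × String))) : String :=
  match prefs with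
  | [] =>
    match options with
    | [] => "Adult"
    | o :: _ => pvLabelD o
  | p :: ps =>
    match options.find? (fun o => PySem.Str.isIn p (pvLabelLC o)) with
    | some o => pvLabelD o
    | none => pvLoopA ps options

def primary_option_label_py (session : List (String × List (List (String × String)))) : String :=
  pvLoopA pvPreferred (pvOptions session)

-- ===== PORT B =====
-- rank(opt): index of the first preference contained in the lowercased label, else len(preferred)
def pvRank (prefs : List String) (label : String) : Nat :=
  match prefs with
  | [] => 0
  | p :: ps => if PySem.Str.isIn p label then 0 else 1 + pvRank ps label

-- one loop iteration: keep the strictly better option (strict '<' keeps the earliest on ties)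
def pvStep (st : Option (List (String × String)) × Nat) (opt : List (String × String)) :
    Option (List (String × String)) × Nat :=
  let r := pvRank pvPreferred (pvLabelLC opt)
  if r < st.2 then (some opt, r) else st

def primary_option_label_py_alt (session : List (String × List (List (String × String)))) : String :=
  let options := pvOptions session
  let st := options.foldl pvStep (none, pvPreferred.length + 1)
  match st.1 with
  | some o => pvLabelD o
  | none => "Adult"

-- ===== PRECONDITION & SPEC =====
def Spec_primary_option_label_py (session : List (String × List (List (String × String)))) (out : String) : Prop := out = primary_option_label_py_alt session
instance (session : List (String × List (List (String × String)))) (out : String) : Decidable (Spec_primary_option_label_py session out) := by unfold Spec_primary_option_label_py; infer_instance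

-- ===== CLAIM (what is proved, stated in full; the proofs are below) =====
def Claim_equal_primary_option_label_py : Prop := ∀ (session : List (String × List (List (String × String)))), Dom_primary_option_label_py session → Spec_primary_option_label_py session (primary_option_label_py session)

-- ===== LEMMAS AND PROOFS =====

-- proof-side stable argmin over a pick-fold
def pvPick (r : List (String × String) → Nat) (b : List (String × String)) (l : List (List (String × String))) : List (String × String) :=
  l.foldl (fun b o => if r o < r b then o else b) b

def pvAm (r : List (String × String) → Nat) : List (List (String × String)) → Option (List (String × String))
  | [] => none
  | x :: xs => some (pvPick r x xs)

theorem pvPick_cons (r : List (String × String) → Nat) (b o : List (String × String)) (l : List (List (String × String))) :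
    pvPick r b (o :: l) = pvPick r (if r o < r b then o else b) l := rfl

theorem pvRank_le (prefs : List String) (lab : String) : pvRank prefs lab ≤ prefs.length := by
  induction prefs with
  | nil => simp [pvRank]
  | cons p ps ih => simp [pvRank]; split <;> omega

-- once a rank-0 element is held, the fold keeps it
theorem pvPick_zero (r : List (String × String) → Nat) (b : List (String × String)) (l : List (List (String × String))) (hb : r b = 0) : pvPick r b l = b := by
  induction l with
  | nil => rfl
  | cons o t ih => rw [pvPick_cons, if_neg (by omega)]; exact ih

-- the fold result is the start or a member
theorem pvPick_mem (r : List (String × String) → Nat) (b : List (String × String)) (l : List (List (String × String))) : pvPick r b l = b ∨ pvPick r b l ∈ l := by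
  induction l generalizing b with
  | nil => left; rfl
  | cons o t ih =>
    rw [pvPick_cons]
    by_cases h : r o < r b
    · rw [if_pos h]; rcases ih o with h' | h'
      · right; rw [h']; exact List.mem_cons_self
      · right; exact List.mem_cons_of_mem _ h'
    · rw [if_neg h]; rcases ih b with h' | h'
      · left; exact h'
      · right; exact List.mem_cons_of_mem _ h'

-- the B-side fold carries (some current option, its rank) once started
theorem foldl_step_some (l : List (List (String × String))) (b : List (String × String)) :
    l.foldl pvStep (some b, pvRank pvPreferred (pvLabelLC b)) =
      (some (pvPick (fun o => pvRank pvPreferred (pvLabelLC o)) b l),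
       pvRank pvPreferred (pvLabelLC (pvPick (fun o => pvRank pvPreferred (pvLabelLC o)) b l))) := by
  induction l generalizing b with
  | nil => rfl
  | cons o t ih =>
    rw [List.foldl_cons, pvPick_cons]
    by_cases h : pvRank pvPreferred (pvLabelLC o) < pvRank pvPreferred (pvLabelLC b)
    · rw [show pvStep (some b, pvRank pvPreferred (pvLabelLC b)) o = (some o, pvRank pvPreferred (pvLabelLC o)) from by simp [pvStep, h]]
      rw [if_pos h]; exact ih o
    · rw [show pvStep (some b, pvRank pvPreferred (pvLabelLC b)) o = (some b, pvRank pvPreferred (pvLabelLC b)) from by simp [pvStep, h]]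
      rw [if_neg h]; exact ih b

-- B in terms of the stable argmin
theorem alt_eq_am (options : List (List (String × String))) :
    (options.foldl pvStep (none, pvPreferred.length + 1)).1 =
      pvAm (fun o => pvRank pvPreferred (pvLabelLC o)) options := by
  cases options with
  | nil => rfl
  | cons o t =>
    have h0 : pvRank pvPreferred (pvLabelLC o) < pvPreferred.length + 1 :=
      Nat.lt_succ_of_le (pvRank_le _ _)
    rw [List.foldl_cons,
        show pvStep (none, pvPreferred.length + 1) o = (some o, pvRank pvPreferred (pvLabelLC o)) from by simp [pvStep, h0],
        foldl_step_some]
    rfl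

-- shifting every rank by 1 does not change the pick
theorem pvPick_shift (r r' : List (String × String) → Nat) (l : List (List (String × String))) (b : List (String × String))
    (h : ∀ x, x = b ∨ x ∈ l → r x = 1 + r' x) : pvPick r b l = pvPick r' b l := by
  induction l generalizing b with
  | nil => rfl
  | cons o t ih =>
    have hb := h b (Or.inl rfl)
    have ho := h o (Or.inr List.mem_cons_self)
    have hnext : ∀ (c : List (String × String)), c = o ∨ c = b →
        (∀ x, x = c ∨ x ∈ t → r x = 1 + r' x) := by
      intro c hc x hx
      rcases hx with h1 | h1
      · rcases hc with hc | hc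
        · exact h x (Or.inr (by rw [h1, hc]; exact List.mem_cons_self))
        · exact h x (Or.inl (by rw [h1, hc]))
      · exact h x (Or.inr (List.mem_cons_of_mem _ h1))
    rw [pvPick_cons, pvPick_cons]
    by_cases hlt : r' o < r' b
    · rw [if_pos (by omega), if_pos hlt]; exact ih o (hnext o (Or.inl rfl))
    · rw [if_neg (by omega), if_neg hlt]; exact ih b (hnext b (Or.inr rfl))

-- if o is the first rank-0 element, the stable argmin is o
theorem pvAm_first_zero (r : List (String × String) → Nat) (pre : List (List (String × String))) (o : List (String × String)) (suf : List (List (String × String)))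
    (ho : r o = 0) (hpre : ∀ x ∈ pre, 0 < r x) :
    pvAm r (pre ++ o :: suf) = some o := by
  cases pre with
  | nil =>
    simp only [List.nil_append, pvAm, Option.some.injEq]
    exact pvPick_zero r o suf ho
  | cons x t =>
    simp only [List.cons_append, pvAm, Option.some.injEq]
    have hb : 0 < r (pvPick r x t) := by
      rcases pvPick_mem r x t with h | h
      · rw [h]; exact hpre x List.mem_cons_self
      · exact hpre _ (List.mem_cons_of_mem _ h)
    have h1 : pvPick r x (t ++ o :: suf) = pvPick r (pvPick r x t) (o :: suf) := by
      simp [pvPick, List.foldl_append]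
    rw [h1, pvPick_cons, if_pos (by omega)]
    exact pvPick_zero r o suf ho

-- the argmins by rank over (p :: ps) and over ps coincide when no option matches p
theorem pvAm_shift (p : String) (ps : List String) (options : List (List (String × String)))
    (hnone : ∀ x ∈ options, PySem.Str.isIn p (pvLabelLC x) = false) :
    pvAm (fun o => pvRank (p :: ps) (pvLabelLC o)) options =
      pvAm (fun o => pvRank ps (pvLabelLC o)) options := by
  have hshift : ∀ x ∈ options, pvRank (p :: ps) (pvLabelLC x) = 1 + pvRank ps (pvLabelLC x) := by
    intro x hx
    simp only [pvRank, hnone x hx, Bool.false_eq_true, if_false]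
  cases options with
  | nil => rfl
  | cons o t =>
    simp only [pvAm, Option.some.injEq]
    exact pvPick_shift _ _ t o (fun x hx => by
      rcases hx with h1 | h1
      · exact hshift x (by rw [h1]; exact List.mem_cons_self)
      · exact hshift x (List.mem_cons_of_mem _ h1))

-- main structural lemma: A's nested scans compute the stable argmin by rank
theorem loopA_eq_am (prefs : List String) (options : List (List (String × String))) :
    pvLoopA prefs options =
      (match pvAm (fun o => pvRank prefs (pvLabelLC o)) options with
       | some o => pvLabelD o
       | none => "Adult") := by
  induction prefs generalizing options with
  | nil =>
    cases options with
    | nil => rfl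
    | cons o t =>
      simp only [pvLoopA, pvAm]
      rw [pvPick_zero _ o t (by simp [pvRank])]
  | cons p ps ih =>
    simp only [pvLoopA]
    cases hf : options.find? (fun o => PySem.Str.isIn p (pvLabelLC o)) with
    | some o =>
      obtain ⟨hmatch, pre, suf, heq, hpre'⟩ := List.find?_eq_some_iff_append.mp hf
      subst heq
      have ho : pvRank (p :: ps) (pvLabelLC o) = 0 := by
        simp only [pvRank, hmatch, if_true]
      have hpre : ∀ x ∈ pre, 0 < pvRank (p :: ps) (pvLabelLC x) := by
        intro x hx
        have hx' : PySem.Str.isIn p (pvLabelLC x) = false := by simpa using hpre' x hx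
        simp only [pvRank, hx', Bool.false_eq_true, if_false]
        omega
      rw [pvAm_first_zero _ pre o suf ho hpre]
    | none =>
      have hnone : ∀ x ∈ options, PySem.Str.isIn p (pvLabelLC x) = false := by
        intro x hx
        simpa using List.find?_eq_none.mp hf x hx
      rw [ih options, ← pvAm_shift p ps options hnone]

-- ===== VERDICT (by name: the statement is the Claim_ definition above) =====
theorem primary_option_label_py_spec : Claim_equal_primary_option_label_py := by
  intro session _
  show primary_option_label_py session = primary_option_label_py_alt session
  simp only [primary_option_label_py, primary_option_label_py_alt]
  rw [loopA_eq_am, alt_eq_am]
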